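-- pv_equiv track=rewrite | github.com/Baasil22/WAF | waf/rules/ssrf.py | _looks_like_url
-- ===== SOURCE A (Python) =====
-- def _looks_like_url(key: str, value: str) -> bool:
--     """Check if a parameter looks like it could contain a URL"""
--     url_param_names = [
--         'url', 'uri', 'path', 'link', 'href', 'src', 'source',
--         'redirect', 'target', 'dest', 'destination', 'rurl',
--         'return', 'return_url', 'callback', 'next', 'ref',
--         'feed', 'host', 'site', 'domain', 'proxy', 'img',
--         'image', 'file', 'document', 'page', 'load', 'fetch'
--     ]
--
--     key_lower = key.lower()
--     if any(name in key_lower for name in url_param_names):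
--         return True
--
--     # Check if value looks like a URL
--     url_indicators = ['http://', 'https://', '://', 'www.', '.com', '.org', '.net']
--     return any(ind in value.lower() for ind in url_indicators)
-- ===== SOURCE B (Python) =====
-- _URL_PARAM_NAMES = ('url', 'uri', 'path', 'link', 'href', 'src', 'source',
--                     'redirect', 'target', 'dest', 'destination', 'rurl',
--                     'return', 'return_url', 'callback', 'next', 'ref',
--                     'feed', 'host', 'site', 'domain', 'proxy', 'img',
--                     'image', 'file', 'document', 'page', 'load', 'fetch')
--
-- _URL_INDICATORS = ('http://', 'https://', '://', 'www.', '.com', '.org', '.net')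
--
--
-- def _match_any(text, keywords):
--     """Multi-pattern matcher: one forward pass over text simulating an NFA.
--     The state set holds the not-yet-consumed remainders of keywords whose
--     partial match is a suffix of the text read so far; a keyword occurs in
--     the text exactly when some remainder becomes empty."""
--     if any(kw == '' for kw in keywords):
--         return True
--     states = []
--     for c in text:
--         states = [st[1:] for st in list(keywords) + states if st[:1] == c]
--         if any(st == '' for st in states):
--             return True
--     return False
--
--
-- def _looks_like_url(key: str, value: str) -> bool:
--     """Check if a parameter looks like it could contain a URL"""
--     if _match_any(key.lower(), _URL_PARAM_NAMES):
--         return True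
--     return _match_any(value.lower(), _URL_INDICATORS)
-- ===== Notes on version B (the rewrite author's own statement) =====
-- stated objective: alternative
-- what changed: Replaces the per-keyword any(sub in text) substring scans by a single forward pass NFA state-set simulation: it maintains the set of partial-match remainders of all keywords at once and reports a hit when a remainder empties.
import Mathlib
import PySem

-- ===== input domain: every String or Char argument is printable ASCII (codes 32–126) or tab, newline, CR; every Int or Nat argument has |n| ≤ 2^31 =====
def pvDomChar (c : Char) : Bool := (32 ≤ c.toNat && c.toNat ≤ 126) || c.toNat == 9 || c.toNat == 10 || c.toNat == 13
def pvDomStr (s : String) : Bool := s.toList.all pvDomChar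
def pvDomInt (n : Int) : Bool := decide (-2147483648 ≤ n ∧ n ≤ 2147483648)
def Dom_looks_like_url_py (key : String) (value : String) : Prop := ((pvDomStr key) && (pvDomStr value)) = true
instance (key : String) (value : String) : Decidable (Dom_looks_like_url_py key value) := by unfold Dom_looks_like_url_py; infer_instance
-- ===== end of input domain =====

-- ===== PORT A =====
-- B replaces the per-keyword substring scans by one forward pass that simulates
-- an NFA over the set of partial-match remainders of all keywords (alternative).
def aUrlParamNames : List String :=
  ["url", "uri", "path", "link", "href", "src", "source",
   "redirect", "target", "dest", "destination", "rurl",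
   "return", "return_url", "callback", "next", "ref",
   "feed", "host", "site", "domain", "proxy", "img",
   "image", "file", "document", "page", "load", "fetch"]

def aUrlIndicators : List String :=
  ["http://", "https://", "://", "www.", ".com", ".org", ".net"]

def looks_like_url_py (key : String) (value : String) : Bool :=
  let key_lower := PySem.Str.lower key
  if aUrlParamNames.any (fun name => PySem.Str.isIn name key_lower) then true
  else aUrlIndicators.any (fun ind => PySem.Str.isIn ind (PySem.Str.lower value))

-- ===== PORT B =====
def bUrlParamNames : List String :=
  ["url", "uri", "path", "link", "href", "src", "source",
   "redirect", "target", "dest", "destination", "rurl",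
   "return", "return_url", "callback", "next", "ref",
   "feed", "host", "site", "domain", "proxy", "img",
   "image", "file", "document", "page", "load", "fetch"]

def bUrlIndicators : List String :=
  ["http://", "https://", "://", "www.", ".com", ".org", ".net"]

-- one NFA step: start a fresh match of every keyword, keep states consuming c
def stepB (kws states : List (List Char)) (c : Char) : List (List Char) :=
  (kws ++ states).filterMap (fun st => if st.head? = some c then some st.tail else none)

-- forward pass over the text with the current state set
def runB (kws states : List (List Char)) : List Char → Bool
  | [] => false
  | c :: t =>
    let states' := stepB kws states c
    if states'.any (·.isEmpty) then true else runB kws states' t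

def matchAnyB (text : String) (kws : List String) : Bool :=
  let kls := kws.map String.toList
  if kls.any (·.isEmpty) then true else runB kls [] text.toList

def looks_like_url_py_alt (key : String) (value : String) : Bool :=
  if matchAnyB (PySem.Str.lower key) bUrlParamNames then true
  else matchAnyB (PySem.Str.lower value) bUrlIndicators

-- ===== PRECONDITION & SPEC =====
def Spec_looks_like_url_py (key : String) (value : String) (out : Bool) : Prop := out = looks_like_url_py_alt key value
instance (key : String) (value : String) (out : Bool) : Decidable (Spec_looks_like_url_py key value out) := by unfold Spec_looks_like_url_py; infer_instance

-- ===== CLAIM (what is proved, stated in full; the proofs are below) =====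
def Claim_equal_looks_like_url_py : Prop := ∀ (key : String) (value : String), Dom_looks_like_url_py key value → Spec_looks_like_url_py key value (looks_like_url_py key value)

-- ===== LEMMAS AND PROOFS =====

theorem mem_stepB (kws states : List (List Char)) (c : Char) (st' : List Char) :
    st' ∈ stepB kws states c ↔ c :: st' ∈ kws ++ states := by
  unfold stepB
  rw [List.mem_filterMap]
  constructor
  · rintro ⟨st, hmem, hst⟩
    split_ifs at hst with hhd
    cases st with
    | nil => simp at hhd
    | cons a u =>
      simp only [List.head?, Option.some.injEq] at hhd
      simp only [List.tail_cons, Option.some.injEq] at hst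
      subst hhd; subst hst; exact hmem
  · intro hmem
    exact ⟨c :: st', hmem, by simp⟩

theorem runB_true_iff (kws : List (List Char)) (states : List (List Char)) (s : List Char) :
    runB kws states s = true ↔
      (∃ kw ∈ kws, kw ≠ [] ∧ kw <:+: s) ∨ (∃ st ∈ states, st ≠ [] ∧ st <+: s) := by
  induction s generalizing states with
  | nil =>
    simp only [runB]
    constructor
    · intro h; simp at h
    · rintro (⟨kw, _, hne, hinf⟩ | ⟨st, _, hne, hpre⟩)
      · exact absurd (List.infix_nil.mp hinf) hne
      · exact absurd (List.prefix_nil.mp hpre) hne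
  | cons c t ih =>
    simp only [runB]
    constructor
    · intro h
      split_ifs at h with hc
      · obtain ⟨st', hmem', hemp⟩ := List.any_eq_true.mp hc
        have he : st' = [] := List.isEmpty_iff.mp hemp
        subst he
        have h1 : [c] ∈ kws ++ states := (mem_stepB kws states c []).mp hmem'
        have hp : [c] <+: c :: t := ⟨t, rfl⟩
        rcases List.mem_append.mp h1 with hk | hs
        · exact Or.inl ⟨[c], hk, by simp, hp.isInfix⟩
        · exact Or.inr ⟨[c], hs, by simp, hp⟩
      · rcases (ih _).mp h with ⟨kw, hk, hne, hinf⟩ | ⟨st', hmem', hne', hpre'⟩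
        · exact Or.inl ⟨kw, hk, hne, hinf.trans (List.suffix_cons c t).isInfix⟩
        · have h1 := (mem_stepB kws states c st').mp hmem'
          have hp : c :: st' <+: c :: t := by
            obtain ⟨r, hr⟩ := hpre'
            exact ⟨r, by simp [hr]⟩
          rcases List.mem_append.mp h1 with hk | hs
          · exact Or.inl ⟨c :: st', hk, by simp, hp.isInfix⟩
          · exact Or.inr ⟨c :: st', hs, by simp, hp⟩
    · intro h
      by_cases hc : ((stepB kws states c).any (·.isEmpty)) = true
      · rw [if_pos hc]
      · rw [if_neg hc]
        apply (ih _).mpr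
        have hnotc : [c] ∉ kws ++ states := by
          intro hmem
          exact hc (List.any_eq_true.mpr ⟨[], (mem_stepB kws states c []).mpr hmem, rfl⟩)
        rcases h with ⟨kw, hk, hne, hinf⟩ | ⟨st, hs, hne, hpre⟩
        · rcases List.infix_cons_iff.mp hinf with hpre | hinf'
          · cases kw with
            | nil => exact absurd rfl hne
            | cons a u =>
              obtain ⟨r, hr⟩ := hpre
              simp only [List.cons_append, List.cons.injEq] at hr
              obtain ⟨hac, hut⟩ := hr
              have hcu : c :: u ∈ kws ++ states :=
                List.mem_append.mpr (Or.inl (hac ▸ hk))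
              have hune : u ≠ [] := by
                intro h0
                exact hnotc (h0 ▸ hcu)
              exact Or.inr ⟨u, (mem_stepB kws states c u).mpr hcu, hune, ⟨r, hut⟩⟩
          · exact Or.inl ⟨kw, hk, hne, hinf'⟩
        · cases st with
          | nil => exact absurd rfl hne
          | cons a u =>
            obtain ⟨r, hr⟩ := hpre
            simp only [List.cons_append, List.cons.injEq] at hr
            obtain ⟨hac, hut⟩ := hr
            have hcu : c :: u ∈ kws ++ states :=
              List.mem_append.mpr (Or.inr (hac ▸ hs))
            have hune : u ≠ [] := by
              intro h0
              exact hnotc (h0 ▸ hcu)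
            exact Or.inr ⟨u, (mem_stepB kws states c u).mpr hcu, hune, ⟨r, hut⟩⟩

theorem matchAnyB_eq_any_isIn (kws : List String) (s : String) :
    matchAnyB s kws = kws.any (fun kw => PySem.Str.isIn kw s) := by
  simp only [matchAnyB]
  split_ifs with he
  · obtain ⟨kl, hmem, hemp⟩ := List.any_eq_true.mp he
    obtain ⟨kw, hk, rfl⟩ := List.mem_map.mp hmem
    symm
    refine List.any_eq_true.mpr ⟨kw, hk, ?_⟩
    rw [PySem.Str.isIn_iff_infix]
    simp only [List.isEmpty_iff] at hemp
    simp [hemp]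
  · cases h : runB (kws.map String.toList) [] s.toList with
    | true =>
      obtain ⟨kl, hmem, hne, hinf⟩ := ((runB_true_iff _ _ _).mp h).resolve_right (by simp)
      obtain ⟨kw, hk, rfl⟩ := List.mem_map.mp hmem
      symm
      exact List.any_eq_true.mpr ⟨kw, hk, (PySem.Str.isIn_iff_infix _ _).mpr hinf⟩
    | false =>
      symm
      rw [Bool.eq_false_iff]
      intro hc
      obtain ⟨kw, hk, hin⟩ := List.any_eq_true.mp hc
      have hne : kw.toList ≠ [] := by
        intro h0
        exact absurd (List.any_eq_true.mpr ⟨kw.toList, List.mem_map.mpr ⟨kw, hk, rfl⟩,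
          by simp [h0]⟩) he
      have ht : runB (kws.map String.toList) [] s.toList = true :=
        (runB_true_iff _ _ _).mpr (Or.inl ⟨kw.toList, List.mem_map.mpr ⟨kw, hk, rfl⟩,
          hne, (PySem.Str.isIn_iff_infix _ _).mp hin⟩)
      rw [ht] at h; simp at h

-- ===== VERDICT (by name: the statement is the Claim_ definition above) =====
theorem looks_like_url_py_spec : Claim_equal_looks_like_url_py := by
  intro key value _
  unfold Spec_looks_like_url_py looks_like_url_py looks_like_url_py_alt
  rw [matchAnyB_eq_any_isIn, matchAnyB_eq_any_isIn]
  rfl
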